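-- pv_equiv track=rewrite | github.com/era1i/Stepik | python_advanced/4.3 nested lists/4.3_amount_of_quarters.py | sum_calc
-- ===== SOURCE A (Python) =====
-- def sum_calc(m):
--     sum_up, sum_right, sum_down, sum_left = 0, 0, 0, 0
--     for i in range(len(m)):
--         for j in range(len(m[i])):
--             if i < j and i < len(m) - 1 - j:
--                 sum_up += m[i][j]
--             elif i < j and i > len(m) - 1 - j:
--                 sum_right += m[i][j]
--             elif i > j and i > len(m) - 1 - j:
--                 sum_down += m[i][j]
--             elif i > j and i < len(m) - 1 - j:
--                 sum_left += m[i][j]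
--     return sum_up, sum_right, sum_down, sum_left
-- ===== SOURCE B (Python) =====
-- def sum_calc(m):
--     n = len(m)
--     up = right = down = left = 0
--     for i, row in enumerate(m):
--         k = n - 1 - i
--         up += sum(row[i + 1:k])
--         right += sum(row[max(i, k) + 1:])
--         down += sum(row[n - i:i])
--         left += sum(row[:min(i, k)])
--     return up, right, down, left
-- ===== Notes on version B (the rewrite author's own statement) =====
-- stated objective: faster
-- what changed: B replaces A's per-cell four-way classification loop with per-row slice sums: for each row it derives the diagonal boundaries once and adds sum() of four clamped slices (left prefix, up middle, down middle, right suffix), eliminating the inner per-cell branching.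
import Mathlib
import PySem

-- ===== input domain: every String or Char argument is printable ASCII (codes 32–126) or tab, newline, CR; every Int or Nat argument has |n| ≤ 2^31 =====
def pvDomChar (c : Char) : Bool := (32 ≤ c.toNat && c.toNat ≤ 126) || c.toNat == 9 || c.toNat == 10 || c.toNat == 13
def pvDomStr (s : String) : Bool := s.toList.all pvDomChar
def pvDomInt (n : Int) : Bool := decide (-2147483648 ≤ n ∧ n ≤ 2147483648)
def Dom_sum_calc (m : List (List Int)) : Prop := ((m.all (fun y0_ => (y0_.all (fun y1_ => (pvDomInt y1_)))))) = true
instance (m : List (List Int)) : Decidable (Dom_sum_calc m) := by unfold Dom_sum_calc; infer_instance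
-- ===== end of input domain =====

-- B sums four clamped row slices per row instead of A's per-cell four-way branch (measured faster by a constant factor).

-- ===== PORT A =====
-- per-cell classification: state (sum_up, sum_right, sum_down, sum_left); m[i] / m[i][j] are
-- in range since i, j come from range(len(m)) / range(len(m[i])), so getD is exact here
def sum_calc (m : List (List Int)) : Int × Int × Int × Int :=
  (List.range m.length).foldl (fun st i =>
    let row := m.getD i []
    (List.range row.length).foldl (fun st j =>
      let v := row.getD j 0
      if (i : Int) < (j : Int) ∧ (i : Int) < (m.length : Int) - 1 - (j : Int) then
        (st.1 + v, st.2.1, st.2.2.1, st.2.2.2)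
      else if (i : Int) < (j : Int) ∧ (i : Int) > (m.length : Int) - 1 - (j : Int) then
        (st.1, st.2.1 + v, st.2.2.1, st.2.2.2)
      else if (j : Int) < (i : Int) ∧ (i : Int) > (m.length : Int) - 1 - (j : Int) then
        (st.1, st.2.1, st.2.2.1 + v, st.2.2.2)
      else if (j : Int) < (i : Int) ∧ (i : Int) < (m.length : Int) - 1 - (j : Int) then
        (st.1, st.2.1, st.2.2.1, st.2.2.2 + v)
      else st) st) (0, 0, 0, 0)

-- ===== PORT B =====
-- per-row slice sums (Source B): up += sum(row[i+1:k]), right += sum(row[max(i,k)+1:]),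
-- down += sum(row[n-i:i]), left += sum(row[:min(i,k)]) with k = n-1-i
def sum_calc_alt (m : List (List Int)) : Int × Int × Int × Int :=
  let n : Int := m.length
  (PySem.List.enumerate m 0).foldl (fun st p =>
    let i := p.1
    let row := p.2
    let k : Int := n - 1 - i
    (st.1 + (PySem.List.slice row (some (i + 1)) (some k)).sum,
     st.2.1 + (PySem.List.slice row (some (max i k + 1)) none).sum,
     st.2.2.1 + (PySem.List.slice row (some (n - i)) (some i)).sum,
     st.2.2.2 + (PySem.List.slice row none (some (min i k))).sum)) (0, 0, 0, 0)

-- ===== PRECONDITION & SPEC =====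
def Spec_sum_calc (m : List (List Int)) (out : Int × Int × Int × Int) : Prop := out = sum_calc_alt m
instance (m : List (List Int)) (out : Int × Int × Int × Int) : Decidable (Spec_sum_calc m out) := by unfold Spec_sum_calc; infer_instance

-- ===== CLAIM (what is proved, stated in full; the proofs are below) =====
def Claim_equal_sum_calc : Prop := ∀ (m : List (List Int)), Dom_sum_calc m → Spec_sum_calc m (sum_calc m)

-- ===== LEMMAS AND PROOFS =====

-- a fold updating the four accumulators independently is four mapped sums
theorem pvFoldlAdd4 {α : Type} (xs : List α) (f g h e : α → Int) (st : Int × Int × Int × Int) :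
    xs.foldl (fun s x => (s.1 + f x, s.2.1 + g x, s.2.2.1 + h x, s.2.2.2 + e x)) st
    = (st.1 + (xs.map f).sum, st.2.1 + (xs.map g).sum,
       st.2.2.1 + (xs.map h).sum, st.2.2.2 + (xs.map e).sum) := by
  induction xs generalizing st with
  | nil => simp
  | cons x t ih => simp [ih]; ring_nf; simp

-- summing r[j] over an index interval [a, b) equals summing the clamped slice
theorem pvSumIteInterval (r : List Int) (a b : Nat) :
    ((List.range r.length).map (fun j => if a ≤ j ∧ j < b then r.getD j 0 else 0)).sum
    = ((r.drop a).take (b - a)).sum := by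
  induction r generalizing a b with
  | nil => simp
  | cons x t ih =>
    have hcong : ∀ j : Nat,
        (if a ≤ j + 1 ∧ j + 1 < b then (x :: t).getD (j + 1) 0 else 0)
        = (if a - 1 ≤ j ∧ j < b - 1 then t.getD j 0 else 0) := by
      intro j
      have : (a ≤ j + 1 ∧ j + 1 < b) ↔ (a - 1 ≤ j ∧ j < b - 1) := by omega
      simp [this]
    have hmap : ((List.range t.length).map
          (fun j => if a ≤ j + 1 ∧ j + 1 < b then (x :: t).getD (j + 1) 0 else 0)).sum
        = ((t.drop (a - 1)).take (b - 1 - (a - 1))).sum := by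
      rw [List.map_congr_left (fun j _ => hcong j)]
      exact ih (a - 1) (b - 1)
    rw [show (x :: t).length = t.length + 1 from rfl, List.range_succ_eq_map,
        List.map_cons, List.map_map, List.sum_cons]
    have hmap' : ((List.range t.length).map
          ((fun j => if a ≤ j ∧ j < b then (x :: t).getD j 0 else 0) ∘ Nat.succ)).sum
        = ((t.drop (a - 1)).take (b - 1 - (a - 1))).sum := by
      rw [← hmap]; rfl
    rw [hmap']
    cases a with
    | zero =>
      cases b with
      | zero => simp
      | succ b' => simp [List.take_succ_cons]
    | succ a' =>
      have : ¬ (a' + 1 ≤ 0 ∧ 0 < b) := by omega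
      simp only [this, if_false, List.drop_succ_cons]
      have h2 : b - 1 - a' = b - (a' + 1) := by omega
      simp [h2]

-- per-row equality, for a row index i < n: A's four per-cell interval sums are B's slice sums
theorem pvRowEq (n : Nat) (i : Nat) (hi : i < n) (row : List Int) :
    ((List.range row.length).map (fun (j : Nat) =>
        if (i : Int) < (j : Int) ∧ (i : Int) < (n : Int) - 1 - (j : Int) then row.getD j 0 else 0)).sum
      = (PySem.List.slice row (some ((i : Int) + 1)) (some ((n : Int) - 1 - i))).sum
    ∧ ((List.range row.length).map (fun (j : Nat) =>
        if (i : Int) < (j : Int) ∧ (i : Int) > (n : Int) - 1 - (j : Int) then row.getD j 0 else 0)).sum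
      = (PySem.List.slice row (some (max (i : Int) ((n : Int) - 1 - i) + 1)) none).sum
    ∧ ((List.range row.length).map (fun (j : Nat) =>
        if (j : Int) < (i : Int) ∧ (i : Int) > (n : Int) - 1 - (j : Int) then row.getD j 0 else 0)).sum
      = (PySem.List.slice row (some ((n : Int) - i)) (some (i : Int))).sum
    ∧ ((List.range row.length).map (fun (j : Nat) =>
        if (j : Int) < (i : Int) ∧ (i : Int) < (n : Int) - 1 - (j : Int) then row.getD j 0 else 0)).sum
      = (PySem.List.slice row none (some (min (i : Int) ((n : Int) - 1 - i)))).sum := by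
  set k : Nat := n - 1 - i with hk
  refine ⟨?_, ?_, ?_, ?_⟩
  · -- up: i < j < k
    have h1 : ((n : Int) - 1 - i) = ((k : Nat) : Int) := by omega
    have h2 : ((i : Int) + 1) = (((i + 1 : Nat) : Nat) : Int) := by push_cast; ring
    rw [h1, h2, PySem.List.slice_natCast]
    rw [List.map_congr_left
        (g := fun (j : Nat) => if i + 1 ≤ j ∧ j < k then row.getD j 0 else 0)
        (fun j _ => by
          have h : ((i : Int) < (j : Int) ∧ (i : Int) < (n : Int) - 1 - (j : Int)) ↔ (i + 1 ≤ j ∧ j < k) := by omega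
          exact if_congr h rfl rfl)]
    exact pvSumIteInterval row (i + 1) k
  · -- right: j > max i k
    have h1 : (max (i : Int) ((n : Int) - 1 - i) + 1) = ((max i k + 1 : Nat) : Int) := by
      push_cast; omega
    rw [h1, PySem.List.slice_from_natCast]
    rw [List.map_congr_left (g := fun (j : Nat) =>
        if max i k + 1 ≤ j ∧ j < row.length then row.getD j 0 else 0)
        (fun j hj => by
          have hjlt : j < row.length := List.mem_range.mp hj
          have h : ((i : Int) < (j : Int) ∧ (i : Int) > (n : Int) - 1 - (j : Int)) ↔
              (max i k + 1 ≤ j ∧ j < row.length) := by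
            constructor
            · intro hp; exact ⟨by omega, hjlt⟩
            · intro hp; omega
          exact if_congr h rfl rfl)]
    rw [pvSumIteInterval row (max i k + 1) row.length]
    congr 1
    have := List.length_drop (l := row) (i := max i k + 1)
    exact List.take_of_length_le (by omega)
  · -- down: k < j < i
    have h1 : ((n : Int) - i) = (((n - i : Nat) : Nat) : Int) := by omega
    rw [h1, show ((i : Int)) = (((i : Nat) : Nat) : Int) from rfl, PySem.List.slice_natCast]
    rw [List.map_congr_left (g := fun (j : Nat) => if n - i ≤ j ∧ j < i then row.getD j 0 else 0)
        (fun j _ => by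
          have h : ((j : Int) < (i : Int) ∧ (i : Int) > (n : Int) - 1 - (j : Int)) ↔ (n - i ≤ j ∧ j < i) := by omega
          exact if_congr h rfl rfl)]
    exact pvSumIteInterval row (n - i) i
  · -- left: j < min i k
    have h1 : (min (i : Int) ((n : Int) - 1 - i)) = ((min i k : Nat) : Int) := by
      push_cast; omega
    rw [h1, PySem.List.slice_to_natCast]
    rw [List.map_congr_left (g := fun (j : Nat) => if 0 ≤ j ∧ j < min i k then row.getD j 0 else 0)
        (fun j _ => by
          have h : ((j : Int) < (i : Int) ∧ (i : Int) < (n : Int) - 1 - (j : Int)) ↔ (0 ≤ j ∧ j < min i k) := by omega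
          exact if_congr h rfl rfl)]
    rw [pvSumIteInterval row 0 (min i k)]
    simp

-- A's if-elif chain is four independent conditional additions (the branches are mutually exclusive)
theorem pvStepEq (m : List (List Int)) (i : Nat) (row : List Int) (st : Int × Int × Int × Int) (j : Nat) :
    (let v := row.getD j 0
     if (i : Int) < (j : Int) ∧ (i : Int) < (m.length : Int) - 1 - (j : Int) then
       (st.1 + v, st.2.1, st.2.2.1, st.2.2.2)
     else if (i : Int) < (j : Int) ∧ (i : Int) > (m.length : Int) - 1 - (j : Int) then
       (st.1, st.2.1 + v, st.2.2.1, st.2.2.2)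
     else if (j : Int) < (i : Int) ∧ (i : Int) > (m.length : Int) - 1 - (j : Int) then
       (st.1, st.2.1, st.2.2.1 + v, st.2.2.2)
     else if (j : Int) < (i : Int) ∧ (i : Int) < (m.length : Int) - 1 - (j : Int) then
       (st.1, st.2.1, st.2.2.1, st.2.2.2 + v)
     else st)
    = (st.1 + (if (i : Int) < (j : Int) ∧ (i : Int) < (m.length : Int) - 1 - (j : Int) then row.getD j 0 else 0),
       st.2.1 + (if (i : Int) < (j : Int) ∧ (i : Int) > (m.length : Int) - 1 - (j : Int) then row.getD j 0 else 0),
       st.2.2.1 + (if (j : Int) < (i : Int) ∧ (i : Int) > (m.length : Int) - 1 - (j : Int) then row.getD j 0 else 0),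
       st.2.2.2 + (if (j : Int) < (i : Int) ∧ (i : Int) < (m.length : Int) - 1 - (j : Int) then row.getD j 0 else 0)) := by
  by_cases h1 : (i : Int) < (j : Int) ∧ (i : Int) < (m.length : Int) - 1 - (j : Int)
  · have n2 : ¬((i : Int) < (j : Int) ∧ (i : Int) > (m.length : Int) - 1 - (j : Int)) := by omega
    have n3 : ¬((j : Int) < (i : Int) ∧ (i : Int) > (m.length : Int) - 1 - (j : Int)) := by omega
    have n4 : ¬((j : Int) < (i : Int) ∧ (i : Int) < (m.length : Int) - 1 - (j : Int)) := by omega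
    simp only [if_pos h1, if_neg n2, if_neg n3, if_neg n4, add_zero]
  · by_cases h2 : (i : Int) < (j : Int) ∧ (i : Int) > (m.length : Int) - 1 - (j : Int)
    · have n3 : ¬((j : Int) < (i : Int) ∧ (i : Int) > (m.length : Int) - 1 - (j : Int)) := by omega
      have n4 : ¬((j : Int) < (i : Int) ∧ (i : Int) < (m.length : Int) - 1 - (j : Int)) := by omega
      simp only [if_neg h1, if_pos h2, if_neg n3, if_neg n4, add_zero]
    · by_cases h3 : (j : Int) < (i : Int) ∧ (i : Int) > (m.length : Int) - 1 - (j : Int)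
      · have n4 : ¬((j : Int) < (i : Int) ∧ (i : Int) < (m.length : Int) - 1 - (j : Int)) := by omega
        simp only [if_neg h1, if_neg h2, if_pos h3, if_neg n4, add_zero]
      · by_cases h4 : (j : Int) < (i : Int) ∧ (i : Int) < (m.length : Int) - 1 - (j : Int)
        · simp only [if_neg h1, if_neg h2, if_neg h3, if_pos h4, add_zero]
        · simp only [if_neg h1, if_neg h2, if_neg h3, if_neg h4, add_zero]

-- A's inner per-cell loop in independent-accumulator form
theorem pvInnerFold (m : List (List Int)) (i : Nat) (row : List Int) (st : Int × Int × Int × Int) :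
    (List.range row.length).foldl (fun st j =>
      let v := row.getD j 0
      if (i : Int) < (j : Int) ∧ (i : Int) < (m.length : Int) - 1 - (j : Int) then
        (st.1 + v, st.2.1, st.2.2.1, st.2.2.2)
      else if (i : Int) < (j : Int) ∧ (i : Int) > (m.length : Int) - 1 - (j : Int) then
        (st.1, st.2.1 + v, st.2.2.1, st.2.2.2)
      else if (j : Int) < (i : Int) ∧ (i : Int) > (m.length : Int) - 1 - (j : Int) then
        (st.1, st.2.1, st.2.2.1 + v, st.2.2.2)
      else if (j : Int) < (i : Int) ∧ (i : Int) < (m.length : Int) - 1 - (j : Int) then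
        (st.1, st.2.1, st.2.2.1, st.2.2.2 + v)
      else st) st
    = (st.1 + ((List.range row.length).map (fun (j : Nat) =>
          if (i : Int) < (j : Int) ∧ (i : Int) < (m.length : Int) - 1 - (j : Int) then row.getD j 0 else 0)).sum,
       st.2.1 + ((List.range row.length).map (fun (j : Nat) =>
          if (i : Int) < (j : Int) ∧ (i : Int) > (m.length : Int) - 1 - (j : Int) then row.getD j 0 else 0)).sum,
       st.2.2.1 + ((List.range row.length).map (fun (j : Nat) =>
          if (j : Int) < (i : Int) ∧ (i : Int) > (m.length : Int) - 1 - (j : Int) then row.getD j 0 else 0)).sum,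
       st.2.2.2 + ((List.range row.length).map (fun (j : Nat) =>
          if (j : Int) < (i : Int) ∧ (i : Int) < (m.length : Int) - 1 - (j : Int) then row.getD j 0 else 0)).sum) := by
  rw [PySem.List.foldl_congr_mem _ _ (fun (st : Int × Int × Int × Int) (j : Nat) =>
        (st.1 + (if (i : Int) < (j : Int) ∧ (i : Int) < (m.length : Int) - 1 - (j : Int) then row.getD j 0 else 0),
         st.2.1 + (if (i : Int) < (j : Int) ∧ (i : Int) > (m.length : Int) - 1 - (j : Int) then row.getD j 0 else 0),
         st.2.2.1 + (if (j : Int) < (i : Int) ∧ (i : Int) > (m.length : Int) - 1 - (j : Int) then row.getD j 0 else 0),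
         st.2.2.2 + (if (j : Int) < (i : Int) ∧ (i : Int) < (m.length : Int) - 1 - (j : Int) then row.getD j 0 else 0)))
      _ (fun st j _ => pvStepEq m i row st j)]
  exact pvFoldlAdd4 _ _ _ _ _ _

-- ===== VERDICT (by name: the statement is the Claim_ definition above) =====
theorem sum_calc_spec : Claim_equal_sum_calc := by
  intro m _
  show sum_calc m = sum_calc_alt m
  simp only [sum_calc, sum_calc_alt]
  rw [PySem.List.foldl_congr_mem _ _ (fun (st : Int × Int × Int × Int) (i : Nat) =>
        (st.1 + ((List.range (m.getD i []).length).map (fun (j : Nat) =>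
            if (i : Int) < (j : Int) ∧ (i : Int) < (m.length : Int) - 1 - (j : Int) then (m.getD i []).getD j 0 else 0)).sum,
         st.2.1 + ((List.range (m.getD i []).length).map (fun (j : Nat) =>
            if (i : Int) < (j : Int) ∧ (i : Int) > (m.length : Int) - 1 - (j : Int) then (m.getD i []).getD j 0 else 0)).sum,
         st.2.2.1 + ((List.range (m.getD i []).length).map (fun (j : Nat) =>
            if (j : Int) < (i : Int) ∧ (i : Int) > (m.length : Int) - 1 - (j : Int) then (m.getD i []).getD j 0 else 0)).sum,
         st.2.2.2 + ((List.range (m.getD i []).length).map (fun (j : Nat) =>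
            if (j : Int) < (i : Int) ∧ (i : Int) < (m.length : Int) - 1 - (j : Int) then (m.getD i []).getD j 0 else 0)).sum))
      _ (fun st i _ => pvInnerFold m i (m.getD i []) st)]
  rw [pvFoldlAdd4, pvFoldlAdd4]
  rw [PySem.List.enumerate_eq_map_pyRange m []]
  simp only [PySem.List.len]
  rw [PySem.List.pyRange_zero_natCast m.length]
  simp only [List.map_map, Function.comp_def, PySem.List.pyGetD_natCast]
  refine Prod.ext ?_ (Prod.ext ?_ (Prod.ext ?_ ?_)) <;>
    simp only [] <;>
    refine congrArg (0 + ·) (congrArg List.sum (List.map_congr_left (fun i hi => ?_))) <;>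
    have him : i < m.length := List.mem_range.mp hi
  · exact (pvRowEq m.length i him (m.getD i [])).1
  · exact (pvRowEq m.length i him (m.getD i [])).2.1
  · exact (pvRowEq m.length i him (m.getD i [])).2.2.1
  · exact (pvRowEq m.length i him (m.getD i [])).2.2.2
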